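-- pv_equiv track=rewrite | github.com/TUPYP7180/CFT-RAG-2025 | rag_base/.ipynb_checkpoints/build_index-checkpoint.py | split_string_by_headings
-- ===== SOURCE A (Python) =====
-- def split_string_by_headings(text: str):
--     lines = text.split("\n")
--     current_block: list[str] = []
--     chunks: list[str] = []
--
--     def concat_block():
--         if len(current_block) > 0:
--             chunks.append("\n".join(current_block))
--             current_block.clear()
--
--     for line in lines:
--         if line.startswith("# "):
--             concat_block()
--         current_block.append(line)
--     concat_block()
--     return chunks
-- ===== SOURCE B (Python) =====
-- def split_string_by_headings(text: str):
--     # Segment the line list block-by-block from the front: each step takes one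
--     # block (head line + following non-heading lines) and recurses on the rest,
--     # instead of A's running accumulator flushed via a callback.
--     lines = text.split("\n")
--     blocks = []
--     rest = lines
--     while rest:
--         head, tail = rest[0], rest[1:]
--         body = []
--         for l in tail:
--             if l.startswith("# "):
--                 break
--             body.append(l)
--         blocks.append([head] + body)
--         rest = tail[len(body):]
--     return ["\n".join(b) for b in blocks]
-- ===== Notes on version B (the rewrite author's own statement) =====
-- stated objective: alternative
-- what changed: B segments the line list block-by-block from the front (take one heading-led block, recurse on the remainder, then join each block) instead of A's single accumulator loop with a flush-on-heading callback.
import Mathlib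
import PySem

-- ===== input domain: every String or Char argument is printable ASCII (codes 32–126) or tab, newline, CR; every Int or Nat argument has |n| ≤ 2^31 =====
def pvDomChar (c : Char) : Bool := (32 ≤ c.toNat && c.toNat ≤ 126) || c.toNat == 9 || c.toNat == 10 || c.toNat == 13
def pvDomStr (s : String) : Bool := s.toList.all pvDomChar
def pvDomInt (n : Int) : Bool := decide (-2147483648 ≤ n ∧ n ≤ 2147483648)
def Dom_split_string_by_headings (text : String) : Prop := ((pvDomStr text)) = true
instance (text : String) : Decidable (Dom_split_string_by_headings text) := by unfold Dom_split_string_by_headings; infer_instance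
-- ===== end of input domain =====

-- B segments the line list block-by-block from the front instead of A's accumulator-with-flush loop; objective: alternative.

-- ===== PORT A =====
-- concat_block(): flush the current block into chunks if nonempty
def pvConcatA (st : List String × List String) : List String × List String :=
  if st.1.length > 0 then ([], st.2 ++ [PySem.Str.join "\n" st.1]) else st

-- one iteration of A's for-loop over lines
def pvStepA (st : List String × List String) (line : String) : List String × List String :=
  let st := if PySem.Str.startswith line "# " then pvConcatA st else st
  (st.1 ++ [line], st.2)

def split_string_by_headings (text : String) : List String :=
  let lines := (PySem.Str.split? text "\n").getD []   -- sep "\n" ≠ "": split? is always some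
  let st := lines.foldl pvStepA ([], [])
  (pvConcatA st).2

-- ===== PORT B =====
-- B's inner for-loop: the non-heading lines following the block's head line
def pvTakeBody : List String → List String
  | [] => []
  | l :: ls => if PySem.Str.startswith l "# " then [] else l :: pvTakeBody ls

-- B's while-loop: peel one block off the front, continue on the remainder
def pvBlocks : List String → List (List String)
  | [] => []
  | head :: tail =>
    let body := pvTakeBody tail
    (head :: body) :: pvBlocks (tail.drop body.length)
termination_by l => l.length
decreasing_by simp [List.length_drop]

def split_string_by_headings_alt (text : String) : List String :=
  let lines := (PySem.Str.split? text "\n").getD []   -- sep "\n" ≠ "": split? is always some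
  (pvBlocks lines).map (PySem.Str.join "\n")

-- ===== PRECONDITION & SPEC =====
def Spec_split_string_by_headings (text : String) (out : List String) : Prop := out = split_string_by_headings_alt text
instance (text : String) (out : List String) : Decidable (Spec_split_string_by_headings text out) := by unfold Spec_split_string_by_headings; infer_instance

-- ===== CLAIM (what is proved, stated in full; the proofs are below) =====
def Claim_equal_split_string_by_headings : Prop := ∀ (text : String), Dom_split_string_by_headings text → Spec_split_string_by_headings text (split_string_by_headings text)

-- ===== LEMMAS AND PROOFS =====

-- unfolding equations for the well-founded recursion pvBlocks
theorem pvBlocks_nil : pvBlocks [] = [] := by rw [pvBlocks]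

theorem pvBlocks_cons (l : String) (ls : List String) :
    pvBlocks (l :: ls) = (l :: pvTakeBody ls) :: pvBlocks (ls.drop (pvTakeBody ls).length) := by
  rw [pvBlocks]

-- A's loop from a nonempty current block produces: previous chunks, then the block
-- completed by the following body lines, then B's blocks of the remainder.
theorem pv_loop_nonempty (ls : List String) : ∀ (cur chunks : List String), cur ≠ [] →
    (pvConcatA (ls.foldl pvStepA (cur, chunks))).2 =
      chunks ++ (PySem.Str.join "\n" (cur ++ pvTakeBody ls)) ::
        (pvBlocks (ls.drop (pvTakeBody ls).length)).map (PySem.Str.join "\n") := by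
  induction ls with
  | nil =>
    intro cur chunks hcur
    have hlen : cur.length > 0 := List.length_pos_iff.mpr hcur
    simp [pvConcatA, pvTakeBody, pvBlocks_nil, hlen]
  | cons l ls ih =>
    intro cur chunks hcur
    have hlen : cur.length > 0 := List.length_pos_iff.mpr hcur
    by_cases h : PySem.Str.startswith l "# " = true
    · simp at h
      have hstep : pvStepA (cur, chunks) l = ([l], chunks ++ [PySem.Str.join "\n" cur]) := by
        simp [pvStepA, pvConcatA, hlen, h]
      rw [List.foldl_cons, hstep, ih [l] _ (by simp)]
      simp [pvTakeBody, h, pvBlocks_cons]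
    · simp at h
      have hstep : pvStepA (cur, chunks) l = (cur ++ [l], chunks) := by
        simp [pvStepA, h]
      rw [List.foldl_cons, hstep, ih (cur ++ [l]) _ (by simp)]
      simp [pvTakeBody, h]

-- A's loop from the initial empty block computes B's joined blocks.
theorem pv_loop_main (ls : List String) :
    (pvConcatA (ls.foldl pvStepA ([], []))).2 =
      (pvBlocks ls).map (PySem.Str.join "\n") := by
  cases ls with
  | nil => simp [pvConcatA, pvBlocks_nil]
  | cons l ls =>
    have hstep : pvStepA ([], []) l = ([l], []) := by
      simp [pvStepA, pvConcatA]
    rw [List.foldl_cons, hstep, pv_loop_nonempty ls [l] [] (by simp), pvBlocks_cons]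
    simp

-- ===== VERDICT (by name: the statement is the Claim_ definition above) =====
theorem split_string_by_headings_spec : Claim_equal_split_string_by_headings := by
  intro text _
  unfold Spec_split_string_by_headings split_string_by_headings split_string_by_headings_alt
  exact pv_loop_main _
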